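-- pv_equiv track=rewrite | github.com/Wacchi-Lorie/voidminer-probability-chart | dimension_ores.py | custom_parser
-- ===== SOURCE A (Python) =====
-- def custom_parser(content):
--     current_section = []
--     config_dict = {}
--
--     for line in content:
--         line = line.strip()
--         if line.startswith('#') or not line:
--             continue
--         elif line.endswith('{'):
--             section_name = line[:-2].strip()
--             current_section.append(section_name)
--         elif line == '}':
--             if current_section:
--                 current_section.pop()
--         else:
--             key, value = line.split('=')
--             full_section_name = '.'.join(current_section)
--             config_dict.setdefault(full_section_name, {})[key.strip()] = value.strip()
--
--     return config_dict
-- ===== SOURCE B (Python) =====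
-- def custom_parser(content):
--     config_dict = {}
--     it = iter(content)
--
--     def parse(prefix):
--         for raw in it:
--             line = raw.strip()
--             if line.startswith('#') or not line:
--                 continue
--             if line.endswith('{'):
--                 parse(prefix + [line[:-2].strip()])
--             elif line == '}':
--                 if prefix:
--                     return
--             else:
--                 key, value = line.split('=')
--                 config_dict.setdefault('.'.join(prefix), {})[key.strip()] = value.strip()
--
--     parse([])
--     return config_dict
-- ===== Notes on version B (the rewrite author's own statement) =====
-- stated objective: alternative
-- what changed: Replaced A's single loop with an explicit section-name stack (append/guarded pop on '{'/'}') by a recursive-descent parser over a shared line iterator: an inner helper carries the current prefix, recurses into a nested call on a section opener and returns to its caller on '}', ignoring a top-level '}'.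
import Mathlib
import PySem

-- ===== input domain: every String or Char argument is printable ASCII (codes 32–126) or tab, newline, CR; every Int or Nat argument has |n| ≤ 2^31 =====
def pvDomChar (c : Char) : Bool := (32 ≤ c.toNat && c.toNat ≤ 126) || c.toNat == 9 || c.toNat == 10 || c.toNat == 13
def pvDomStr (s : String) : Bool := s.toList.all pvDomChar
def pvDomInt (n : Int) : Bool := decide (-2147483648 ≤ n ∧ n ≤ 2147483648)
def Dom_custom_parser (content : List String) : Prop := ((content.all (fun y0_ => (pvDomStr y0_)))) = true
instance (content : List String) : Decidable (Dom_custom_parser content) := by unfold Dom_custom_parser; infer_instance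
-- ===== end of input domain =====

-- B replaces A's explicit section-name stack with a recursive-descent parser over the line stream; objective: alternative decomposition (same cost).


-- ===== PORT A =====
-- shared helper for the line "key, value = line.split('='); config_dict.setdefault('.'.join(sect), {})[key.strip()] = value.strip()"
-- which both Pythons contain verbatim (setdefault-then-mutate = overwrite-in-place insert of the updated inner dict);
-- the unmatched split arm is where Python raises ValueError — excluded by Pre_.
def pvKV (sect : List String) (d : PySem.Dict String (PySem.Dict String String))
    (k v : String) : PySem.Dict String (PySem.Dict String String) :=
  let full := PySem.Str.join "." sect
  d.insert full ((d.getD full PySem.Dict.empty).insert (PySem.Str.strip k) (PySem.Str.strip v))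

def pvNext (sect : List String) (d : PySem.Dict String (PySem.Dict String String))
    (line : String) : PySem.Dict String (PySem.Dict String String) :=
  match PySem.Str.split? line "=" with
  | some [k, v] => pvKV sect d k v
  | _ => d

-- one iteration of A's for-loop over the state (current_section, config_dict)
def pvStepA (st : List String × PySem.Dict String (PySem.Dict String String)) (raw : String) :
    List String × PySem.Dict String (PySem.Dict String String) :=
  let line := PySem.Str.strip raw
  if PySem.Str.startswith line "#" || line == "" then st
  else if PySem.Str.endswith line "{" then
    (st.1 ++ [PySem.Str.strip (PySem.Str.slice line none (some (-2)))], st.2)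
  else if line == "}" then
    (st.1.dropLast, st.2)      -- 'if current_section: current_section.pop()' ; dropLast [] = []
  else
    (st.1, pvNext st.1 st.2 line)

def custom_parser (content : List String) : List (String × List (String × String)) :=
  ((content.foldl pvStepA ([], PySem.Dict.empty)).2.items).map (fun p => (p.1, p.2.items))

-- ===== PORT B =====
-- recursive descent: consume lines from the shared stream, recurse on '… {', return on '}' when nested;
-- returns the unconsumed remainder of the stream together with the dict. The length bound carried in the
-- subtype only justifies termination of the nested recursion (totality bookkeeping, not an algorithm change).
def pvParseB : (xs : List String) → List String → PySem.Dict String (PySem.Dict String String) →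
    {r : List String × PySem.Dict String (PySem.Dict String String) // r.1.length ≤ xs.length}
  | [], _, d => ⟨([], d), Nat.le_refl 0⟩
  | raw :: rest, prefx, d =>
    let line := PySem.Str.strip raw
    if PySem.Str.startswith line "#" || line == "" then
      ⟨(pvParseB rest prefx d).val, Nat.le_succ_of_le (pvParseB rest prefx d).property⟩
    else if PySem.Str.endswith line "{" then
      let r1 := pvParseB rest (prefx ++ [PySem.Str.strip (PySem.Str.slice line none (some (-2)))]) d
      ⟨(pvParseB r1.val.1 prefx r1.val.2).val,
        Nat.le_trans (pvParseB r1.val.1 prefx r1.val.2).property (Nat.le_succ_of_le r1.property)⟩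
    else if line == "}" then
      if prefx ≠ [] then ⟨(rest, d), Nat.le_succ _⟩
      else ⟨(pvParseB rest prefx d).val, Nat.le_succ_of_le (pvParseB rest prefx d).property⟩
    else
      ⟨(pvParseB rest prefx (pvNext prefx d line)).val,
        Nat.le_succ_of_le (pvParseB rest prefx (pvNext prefx d line)).property⟩
termination_by xs => xs.length
decreasing_by
  · simp
  · simp
  · exact Nat.lt_succ_of_le r1.property
  · simp
  · simp

def custom_parser_alt (content : List String) : List (String × List (String × String)) :=
  ((pvParseB content [] PySem.Dict.empty).val.2.items).map (fun p => (p.1, p.2.items))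

-- ===== PRECONDITION & SPEC =====
-- Pre_ excludes exactly the inputs where Python A raises ValueError: a stripped line that is non-blank,
-- not a comment, not a section opener '… {', not '}', and does not contain exactly one '='
-- ('key, value = line.split('=')' fails to unpack there; B raises identically).
def Pre_custom_parser (content : List String) : Prop :=
  ∀ raw ∈ content,
    PySem.Str.startswith (PySem.Str.strip raw) "#" = true ∨ PySem.Str.strip raw = "" ∨
    PySem.Str.endswith (PySem.Str.strip raw) "{" = true ∨ PySem.Str.strip raw = "}" ∨
    PySem.Str.count (PySem.Str.strip raw) "=" = 1
instance (content : List String) : Decidable (Pre_custom_parser content) := by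
  unfold Pre_custom_parser; infer_instance
def pvWitness_custom_parser : List String := ["# top", "server {", "  port = 80", "}", "name=x"]
def Spec_custom_parser (content : List String) (out : List (String × List (String × String))) : Prop := out = custom_parser_alt content
instance (content : List String) (out : List (String × List (String × String))) : Decidable (Spec_custom_parser content out) := by unfold Spec_custom_parser; infer_instance

-- ===== CLAIM (what is proved, stated in full; the proofs are below) =====
def Claim_equal_custom_parser : Prop := ∀ (content : List String), Dom_custom_parser content → Pre_custom_parser content → Spec_custom_parser content (custom_parser content)

-- ===== LEMMAS AND PROOFS =====

-- A's whole loop as a function of the state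
def pvFoldA (xs : List String) (st : List String × PySem.Dict String (PySem.Dict String String)) :
    List String × PySem.Dict String (PySem.Dict String String) := xs.foldl pvStepA st

theorem pvFoldA_cons (x : String) (xs : List String)
    (st : List String × PySem.Dict String (PySem.Dict String String)) :
    pvFoldA (x :: xs) st = pvFoldA xs (pvStepA st x) := rfl

-- one-step characterisations of the two programs, per branch
theorem pvParseB_nil (prefx : List String) (d : PySem.Dict String (PySem.Dict String String)) :
    (pvParseB [] prefx d).val = ([], d) := by rw [pvParseB]

theorem pvStepA_skip (sect : List String) (d : PySem.Dict String (PySem.Dict String String)) (raw : String)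
    (h1 : (PySem.Str.startswith (PySem.Str.strip raw) "#" || PySem.Str.strip raw == "") = true) :
    pvStepA (sect, d) raw = (sect, d) := by
  simp only [pvStepA, h1, if_true]

theorem pvParseB_skip (raw : String) (rest prefx : List String)
    (d : PySem.Dict String (PySem.Dict String String))
    (h1 : (PySem.Str.startswith (PySem.Str.strip raw) "#" || PySem.Str.strip raw == "") = true) :
    (pvParseB (raw :: rest) prefx d).val = (pvParseB rest prefx d).val := by
  rw [pvParseB]; simp only [h1, if_true]

theorem pvStepA_open (sect : List String) (d : PySem.Dict String (PySem.Dict String String)) (raw : String)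
    (h1 : (PySem.Str.startswith (PySem.Str.strip raw) "#" || PySem.Str.strip raw == "") = false)
    (h2 : PySem.Str.endswith (PySem.Str.strip raw) "{" = true) :
    pvStepA (sect, d) raw =
      (sect ++ [PySem.Str.strip (PySem.Str.slice (PySem.Str.strip raw) none (some (-2)))], d) := by
  simp only [pvStepA, h1, h2, Bool.false_eq_true, if_false, if_true]

theorem pvParseB_open (raw : String) (rest prefx : List String)
    (d : PySem.Dict String (PySem.Dict String String))
    (h1 : (PySem.Str.startswith (PySem.Str.strip raw) "#" || PySem.Str.strip raw == "") = false)
    (h2 : PySem.Str.endswith (PySem.Str.strip raw) "{" = true) :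
    (pvParseB (raw :: rest) prefx d).val =
      (pvParseB
        (pvParseB rest (prefx ++ [PySem.Str.strip (PySem.Str.slice (PySem.Str.strip raw) none (some (-2)))]) d).val.1
        prefx
        (pvParseB rest (prefx ++ [PySem.Str.strip (PySem.Str.slice (PySem.Str.strip raw) none (some (-2)))]) d).val.2).val := by
  rw [pvParseB]; simp only [h1, h2, Bool.false_eq_true, if_false, if_true]

theorem pvStepA_close (sect : List String) (d : PySem.Dict String (PySem.Dict String String)) (raw : String)
    (h3 : PySem.Str.strip raw = "}") :
    pvStepA (sect, d) raw = (sect.dropLast, d) := by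
  have e1 : (PySem.Str.startswith "}" "#" || ("}" : String) == "") = false := by decide
  have e2 : PySem.Str.endswith "}" "{" = false := by decide
  simp only [pvStepA, h3, e1, e2, Bool.false_eq_true, if_false, BEq.rfl, if_true]

theorem pvParseB_close_ne (raw : String) (rest prefx : List String)
    (d : PySem.Dict String (PySem.Dict String String))
    (h3 : PySem.Str.strip raw = "}") (hp : prefx ≠ []) :
    (pvParseB (raw :: rest) prefx d).val = (rest, d) := by
  have e1 : (PySem.Str.startswith "}" "#" || ("}" : String) == "") = false := by decide
  have e2 : PySem.Str.endswith "}" "{" = false := by decide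
  rw [pvParseB]; simp only [h3, e1, e2, Bool.false_eq_true, if_false, BEq.rfl, if_true, hp,
    ne_eq, not_false_eq_true]

theorem pvParseB_close_nil (raw : String) (rest : List String)
    (d : PySem.Dict String (PySem.Dict String String))
    (h3 : PySem.Str.strip raw = "}") :
    (pvParseB (raw :: rest) [] d).val = (pvParseB rest [] d).val := by
  have e1 : (PySem.Str.startswith "}" "#" || ("}" : String) == "") = false := by decide
  have e2 : PySem.Str.endswith "}" "{" = false := by decide
  rw [pvParseB]; simp only [h3, e1, e2, Bool.false_eq_true, if_false, BEq.rfl, if_true, ne_eq,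
    not_true_eq_false]

theorem pvStepA_kv (sect : List String) (d : PySem.Dict String (PySem.Dict String String)) (raw : String)
    (h1 : (PySem.Str.startswith (PySem.Str.strip raw) "#" || PySem.Str.strip raw == "") = false)
    (h2 : PySem.Str.endswith (PySem.Str.strip raw) "{" = false)
    (h3 : (PySem.Str.strip raw == "}") = false) :
    pvStepA (sect, d) raw = (sect, pvNext sect d (PySem.Str.strip raw)) := by
  simp only [pvStepA, h1, h2, h3, Bool.false_eq_true, if_false]

theorem pvParseB_kv (raw : String) (rest prefx : List String)
    (d : PySem.Dict String (PySem.Dict String String))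
    (h1 : (PySem.Str.startswith (PySem.Str.strip raw) "#" || PySem.Str.strip raw == "") = false)
    (h2 : PySem.Str.endswith (PySem.Str.strip raw) "{" = false)
    (h3 : (PySem.Str.strip raw == "}") = false) :
    (pvParseB (raw :: rest) prefx d).val =
      (pvParseB rest prefx (pvNext prefx d (PySem.Str.strip raw))).val := by
  rw [pvParseB]; simp only [h1, h2, h3, Bool.false_eq_true, if_false]

-- Core correspondence, by strong induction on the number of remaining lines:
-- (1) inside a section (prefx ≠ []), the dict A's loop builds from (prefx, d) equals the dict built by
--     B's parse call followed by A's loop on the unconsumed remainder with the popped stack;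
-- (2) at top level the two dicts agree and B consumes the whole stream.
theorem pv_main (n : Nat) :
    ∀ (xs : List String), xs.length ≤ n →
      (∀ (prefx : List String) d, prefx ≠ [] →
        (pvFoldA xs (prefx, d)).2 =
          (pvFoldA (pvParseB xs prefx d).val.1 (prefx.dropLast, (pvParseB xs prefx d).val.2)).2) ∧
      (∀ d, (pvFoldA xs ([], d)).2 = (pvParseB xs [] d).val.2 ∧ (pvParseB xs [] d).val.1 = []) := by
  induction n with
  | zero =>
    intro xs hlen
    have hx : xs = [] := List.length_eq_zero_iff.mp (Nat.le_zero.mp hlen)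
    subst hx
    exact ⟨fun prefx d _ => by simp [pvParseB_nil, pvFoldA],
      fun d => by simp [pvParseB_nil, pvFoldA]⟩
  | succ n ih =>
    intro xs hlen
    cases xs with
    | nil => exact ⟨fun prefx d _ => by simp [pvParseB_nil, pvFoldA],
        fun d => by simp [pvParseB_nil, pvFoldA]⟩
    | cons raw rest =>
      have hrest : rest.length ≤ n := by simpa using hlen
      constructor
      · intro prefx d hp
        rw [pvFoldA_cons]
        by_cases h1 : (PySem.Str.startswith (PySem.Str.strip raw) "#" || PySem.Str.strip raw == "") = true
        · rw [pvStepA_skip _ _ _ h1, pvParseB_skip _ _ _ _ h1]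
          exact (ih rest hrest).1 prefx d hp
        · replace h1 := Bool.eq_false_iff.mpr h1
          by_cases h2 : PySem.Str.endswith (PySem.Str.strip raw) "{" = true
          · rw [pvStepA_open _ _ _ h1 h2, pvParseB_open _ _ _ _ h1 h2]
            set s := PySem.Str.strip (PySem.Str.slice (PySem.Str.strip raw) none (some (-2)))
            have step1 := (ih rest hrest).1 (prefx ++ [s]) d (by simp)
            have hdl : (prefx ++ [s]).dropLast = prefx := by simp
            rw [hdl] at step1
            rw [step1]
            exact (ih (pvParseB rest (prefx ++ [s]) d).val.1
              (Nat.le_trans (pvParseB rest (prefx ++ [s]) d).property hrest)).1 prefx _ hp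
          · replace h2 := Bool.eq_false_iff.mpr h2
            by_cases h3 : PySem.Str.strip raw = "}"
            · rw [pvStepA_close _ _ _ h3, pvParseB_close_ne _ _ _ _ h3 hp]
            · have h3' : (PySem.Str.strip raw == "}") = false := by simpa using h3
              rw [pvStepA_kv _ _ _ h1 h2 h3', pvParseB_kv _ _ _ _ h1 h2 h3']
              exact (ih rest hrest).1 prefx _ hp
      · intro d
        rw [pvFoldA_cons]
        by_cases h1 : (PySem.Str.startswith (PySem.Str.strip raw) "#" || PySem.Str.strip raw == "") = true
        · rw [pvStepA_skip _ _ _ h1, pvParseB_skip _ _ _ _ h1]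
          exact (ih rest hrest).2 d
        · replace h1 := Bool.eq_false_iff.mpr h1
          by_cases h2 : PySem.Str.endswith (PySem.Str.strip raw) "{" = true
          · rw [pvStepA_open _ _ _ h1 h2, pvParseB_open _ _ _ _ h1 h2]
            set s := PySem.Str.strip (PySem.Str.slice (PySem.Str.strip raw) none (some (-2)))
            have step1 := (ih rest hrest).1 ([] ++ [s]) d (by simp)
            have hdl : (([] : List String) ++ [s]).dropLast = [] := by simp
            rw [hdl] at step1
            rw [List.nil_append] at step1 ⊢
            rw [step1]
            exact (ih (pvParseB rest [s] d).val.1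
              (Nat.le_trans (pvParseB rest [s] d).property hrest)).2 _
          · replace h2 := Bool.eq_false_iff.mpr h2
            by_cases h3 : PySem.Str.strip raw = "}"
            · rw [pvStepA_close _ _ _ h3, pvParseB_close_nil _ _ _ h3]
              simpa using (ih rest hrest).2 d
            · have h3' : (PySem.Str.strip raw == "}") = false := by simpa using h3
              rw [pvStepA_kv _ _ _ h1 h2 h3', pvParseB_kv _ _ _ _ h1 h2 h3']
              exact (ih rest hrest).2 _

-- ===== VERDICT (by name: the statement is the Claim_ definition above) =====
theorem custom_parser_spec : Claim_equal_custom_parser := by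
  intro content _ _
  unfold Spec_custom_parser custom_parser custom_parser_alt
  have h2 : (content.foldl pvStepA ([], PySem.Dict.empty)).2
      = (pvParseB content [] PySem.Dict.empty).val.2 :=
    ((pv_main content.length content (Nat.le_refl _)).2 PySem.Dict.empty).1
  rw [h2]
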